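-- pv_equiv track=rewrite | github.com/tie-ling/tub | 1/coma1/DO_NOT_USE_pa07.py | extractSquare
-- ===== SOURCE A (Python) =====
-- def extractSquare(positions: list[list[str, int]]):
--     square = []
--     index = positions[-1][1]
--     num = len(positions) - 1
--     while num >= 0:
--         if positions[num][1] == index:
--             square.append(positions.pop())
--         else:
--             break
--         num -= 1
--     return positions,square
-- ===== SOURCE B (Python) =====
-- def extractSquare(positions: list[list[str, int]]):
--     index = positions[-1][1]
--     k = len(positions)
--     while k > 0 and positions[k - 1][1] == index:
--         k -= 1
--     square = positions[k:]
--     square.reverse()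
--     del positions[k:]
--     return positions, square
-- ===== Notes on version B (the rewrite author's own statement) =====
-- stated objective: alternative
-- what changed: B scans backward over indices to find the split point k without mutating the list element-by-element, then builds square as a reversed slice and truncates once with del, instead of A's repeated pop/append loop.
import Mathlib
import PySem

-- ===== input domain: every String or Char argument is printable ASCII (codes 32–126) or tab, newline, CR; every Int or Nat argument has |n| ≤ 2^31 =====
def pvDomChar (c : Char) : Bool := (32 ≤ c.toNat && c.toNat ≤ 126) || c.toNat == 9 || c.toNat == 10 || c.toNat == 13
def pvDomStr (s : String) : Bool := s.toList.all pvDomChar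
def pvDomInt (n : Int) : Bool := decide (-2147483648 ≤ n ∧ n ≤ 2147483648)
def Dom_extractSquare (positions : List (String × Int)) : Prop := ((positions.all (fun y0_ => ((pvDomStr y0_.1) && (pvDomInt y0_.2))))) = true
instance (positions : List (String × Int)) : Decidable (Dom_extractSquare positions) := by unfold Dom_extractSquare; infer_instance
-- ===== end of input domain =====

-- B replaces A's pop/append while-loop by a backward index scan to the split point k,
-- then one reversed slice and one truncation (same algorithmic cost; different decomposition).
-- Both programs mutate the argument list in place in Python; the equivalence proved here is
-- about the returned pair (whose first component is that mutated list in both programs).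

-- ===== PORT A =====
-- A's while-loop: num ≥ 0; if positions[num][1] == index, pop the last element onto square,
-- num -= 1; else break. Recursion is on the shrinking positions list (pop? removes the last).
def extractSquareLoopA (positions square : List (String × Int)) (index : Int) (num : Int) :
    (List (String × Int)) × (List (String × Int)) :=
  if num ≥ 0 then
    match PySem.List.pyGet? positions num with
    | some p =>
      if p.2 == index then
        match h : PySem.List.pop? positions (-1) with
        | some (last, rest) =>
          extractSquareLoopA rest (square ++ [last]) index (num - 1)
        | none => (positions, square)   -- unreachable: pyGet? succeeded, so positions ≠ []
      else (positions, square)          -- break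
    | none => (positions, square)       -- unreachable inside the loop
  else (positions, square)
termination_by positions.length
decreasing_by
  have h2 := PySem.List.length_of_pop?_eq_some positions h
  simp only [] at h2
  omega

def extractSquare (positions : List (String × Int)) : (List (String × Int)) × (List (String × Int)) :=
  match PySem.List.pyGet? positions (-1) with
  | none => ([], [])                    -- IndexError in Python; excluded by Pre_
  | some lastp =>
    extractSquareLoopA positions [] lastp.2 ((positions.length : Int) - 1)

-- ===== PORT B =====
-- B's while-loop: k > 0 and positions[k-1][1] == index → k -= 1; structural recursion on k.
def extractSquareFindK (positions : List (String × Int)) (index : Int) : Nat → Nat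
  | 0 => 0
  | k + 1 =>
    match PySem.List.pyGet? positions (k : Int) with
    | some p => if p.2 == index then extractSquareFindK positions index k else k + 1
    | none => k + 1

def extractSquare_alt (positions : List (String × Int)) : (List (String × Int)) × (List (String × Int)) :=
  match PySem.List.pyGet? positions (-1) with
  | none => ([], [])                    -- IndexError in Python; excluded by Pre_
  | some lastp =>
    let k := extractSquareFindK positions lastp.2 positions.length
    (positions.take k, (positions.drop k).reverse)

-- ===== PRECONDITION & SPEC =====
-- Pre_ excludes exactly the empty list, on which both Pythons raise IndexError at positions[-1].
def Pre_extractSquare (positions : List (String × Int)) : Prop := positions ≠ []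
instance (positions : List (String × Int)) : Decidable (Pre_extractSquare positions) := by
  unfold Pre_extractSquare; infer_instance

def pvWitness_extractSquare : (List (String × Int)) := [("a", 1), ("b", 2), ("c", 2)]

def Spec_extractSquare (positions : List (String × Int)) (out : (List (String × Int)) × (List (String × Int))) : Prop := out = extractSquare_alt positions
instance (positions : List (String × Int)) (out : (List (String × Int)) × (List (String × Int))) : Decidable (Spec_extractSquare positions out) := by unfold Spec_extractSquare; infer_instance

-- ===== CLAIM (what is proved, stated in full; the proofs are below) =====
def Claim_equal_extractSquare : Prop := ∀ (positions : List (String × Int)), Dom_extractSquare positions → Pre_extractSquare positions → Spec_extractSquare positions (extractSquare positions)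

-- ===== LEMMAS AND PROOFS =====

-- findK only inspects indices < k, so appending past k does not change it.
theorem findK_append (ps : List (String × Int)) (a : String × Int) (idx : Int) :
    ∀ k : Nat, k ≤ ps.length →
      extractSquareFindK (ps ++ [a]) idx k = extractSquareFindK ps idx k := by
  intro k
  induction k with
  | zero => intro _; rfl
  | succ k ih =>
    intro hk
    have hlt : k < ps.length := by omega
    have hget : PySem.List.pyGet? (ps ++ [a]) (k : Int) = PySem.List.pyGet? ps (k : Int) := by
      rw [PySem.List.pyGet?_natCast, PySem.List.pyGet?_natCast,
        List.getElem?_append_left hlt]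
    simp only [extractSquareFindK, hget]
    cases hp : PySem.List.pyGet? ps (k : Int) with
    | none => rfl
    | some p =>
      by_cases h : p.2 == idx
      · simp [h, ih (by omega)]
      · simp [h]

theorem findK_le (ps : List (String × Int)) (idx : Int) :
    ∀ k : Nat, extractSquareFindK ps idx k ≤ k := by
  intro k
  induction k with
  | zero => exact Nat.le_refl 0
  | succ k ih =>
    simp only [extractSquareFindK]
    cases hp : PySem.List.pyGet? ps (k : Int) with
    | none => exact Nat.le_refl _
    | some p =>
      by_cases h : p.2 == idx
      · simp [h]; omega
      · simp [h]

-- Main loop invariant: A's loop, started with num = len - 1, computes B's take/drop split.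
theorem loopA_eq (ps : List (String × Int)) : ∀ (sq : List (String × Int)) (idx : Int),
    extractSquareLoopA ps sq idx ((ps.length : Int) - 1) =
      (ps.take (extractSquareFindK ps idx ps.length),
       sq ++ (ps.drop (extractSquareFindK ps idx ps.length)).reverse) := by
  induction ps using List.reverseRecOn with
  | nil =>
    intro sq idx
    rw [extractSquareLoopA.eq_def]
    simp [extractSquareFindK]
  | append_singleton ps a ih =>
    intro sq idx
    have hlen : ((ps ++ [a]).length : Int) - 1 = (ps.length : Int) := by
      simp
    rw [hlen]
    have hge : (ps.length : Int) ≥ 0 := by positivity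
    have hget : PySem.List.pyGet? (ps ++ [a]) (ps.length : Int) = some a := by
      rw [PySem.List.pyGet?_natCast]
      simp
    have hpop : PySem.List.pop? (ps ++ [a]) (-1) = some (a, ps) := by
      have := PySem.List.pop?_last (xs := ps) (x := a)
      simpa using this
    rw [extractSquareLoopA.eq_def]
    simp only [hge, if_true, hget]
    have hkdef : extractSquareFindK (ps ++ [a]) idx (ps ++ [a]).length
        = (if a.2 == idx then extractSquareFindK (ps ++ [a]) idx ps.length else ps.length + 1) := by
      have : (ps ++ [a]).length = ps.length + 1 := by simp
      rw [this, extractSquareFindK, hget]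
    by_cases h : a.2 == idx
    · simp only [h, if_true]
      have hk : extractSquareFindK (ps ++ [a]) idx (ps ++ [a]).length
          = extractSquareFindK ps idx ps.length := by
        rw [hkdef, if_pos h, findK_append ps a idx ps.length (Nat.le_refl _)]
      rw [hk]
      have hle := findK_le ps idx ps.length
      split
      · rename_i last rest heq
        rw [hpop] at heq
        injection heq with heq
        injection heq with h1 h2
        subst h1; subst h2
        rw [ih (sq ++ [a]) idx,
          List.take_append_of_le_length hle, List.drop_append_of_le_length hle]
        simp
      · rename_i heq
        rw [hpop] at heq
        exact absurd heq (by simp)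
    · simp only [h]
      rw [if_neg (by simp)]
      have hk : extractSquareFindK (ps ++ [a]) idx (ps ++ [a]).length = ps.length + 1 := by
        rw [hkdef, if_neg h]
      rw [hk, List.take_of_length_le (by simp), List.drop_of_length_le (by simp)]
      simp

-- ===== VERDICT (by name: the statement is the Claim_ definition above) =====
theorem extractSquare_spec : Claim_equal_extractSquare := by
  intro positions _ hpre
  unfold Spec_extractSquare extractSquare extractSquare_alt
  cases hg : PySem.List.pyGet? positions (-1) with
  | none =>
    exfalso
    rw [PySem.List.pyGet?_neg_one] at hg
    exact hpre (List.getLast?_eq_none_iff.mp hg)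
  | some lastp =>
    exact loopA_eq positions [] lastp.2
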